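-- pv_equiv track=rewrite | github.com/adi271001/POTD | Gfg/Even-Swap.py | lexicographicallyLargest
-- ===== SOURCE A (Python) =====
-- def lexicographicallyLargest(a, n):
--     #your code here
--     b=[]
--     small=[]
--     for i in range(n):
--         if not small:
--             small.append(a[i])
--         elif not (small[-1]+a[i])%2:
--             small.append(a[i])
--         else:
--             small.sort()
--             while small:
--                 b.append(small.pop())
--             small.append(a[i])
--     if small:
--         small.sort()
--         while small:
--             b.append(small.pop())
--     return b
-- ===== SOURCE B (Python) =====
-- def lexicographicallyLargest(a, n):
--     xs = a[:max(0, n)]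
--     # phase 1: split xs into maximal same-parity runs
--     runs = []
--     i = 0
--     while i < len(xs):
--         j = i + 1
--         while j < len(xs) and xs[j] % 2 == xs[i] % 2:
--             j += 1
--         runs.append(xs[i:j])
--         i = j
--     # phase 2: sort each run descending and flatten
--     out = []
--     for r in runs:
--         out += sorted(r, reverse=True)
--     return out
-- ===== Notes on version B (the rewrite author's own statement) =====
-- stated objective: alternative
-- what changed: Replaces A's single interleaved accumulate-sort-and-flush pass (with a mutable 'small' buffer drained by sort+pop) by a two-phase decomposition: first build the explicit list of maximal same-parity runs of a[:n], then sort each run descending and flatten.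
import Mathlib
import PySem

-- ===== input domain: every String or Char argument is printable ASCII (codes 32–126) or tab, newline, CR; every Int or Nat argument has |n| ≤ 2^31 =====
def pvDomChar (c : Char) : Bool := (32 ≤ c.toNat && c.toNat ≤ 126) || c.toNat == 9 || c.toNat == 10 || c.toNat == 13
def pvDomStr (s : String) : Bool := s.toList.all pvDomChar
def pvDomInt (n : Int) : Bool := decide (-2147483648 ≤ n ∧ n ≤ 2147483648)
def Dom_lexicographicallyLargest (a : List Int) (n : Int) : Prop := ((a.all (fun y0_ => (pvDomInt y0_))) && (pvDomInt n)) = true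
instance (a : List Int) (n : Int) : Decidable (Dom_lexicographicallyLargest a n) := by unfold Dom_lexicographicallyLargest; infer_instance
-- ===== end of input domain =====

-- B replaces A's single interleaved accumulate-sort-and-flush pass by a two-phase
-- decomposition (build the list of maximal same-parity runs, then sort each descending
-- and flatten); same cost (objective: alternative). Return-value equivalence only.


-- ===== PORT A =====
-- A's loop body on the fetched value a[i]; state st = (b, small).
-- The drain 'small.sort(); while small: b.append(small.pop())' sorts ascending and then
-- appends popping from the end, i.e. appends the sorted list back-to-front: exact.
def pvStepV (st : List Int × List Int) (x : Int) : List Int × List Int :=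
  if st.2 = [] then (st.1, st.2 ++ [x])
  else if PySem.Int.mod (PySem.List.pyGetD st.2 (-1) 0 + x) 2 = 0 then (st.1, st.2 ++ [x])
  else (st.1 ++ (PySem.List.sorted st.2 (fun x => x) false).reverse, [x])

def lexicographicallyLargest (a : List Int) (n : Int) : List Int :=
  -- for i in range(n): body on a[i]  (pyGetD: under Pre_ every index is in range)
  let st := (PySem.List.pyRange 0 n 1).foldl (fun st i => pvStepV st (PySem.List.pyGetD a i 0)) ([], [])
  if st.2 = [] then st.1
  else st.1 ++ (PySem.List.sorted st.2 (fun x => x) false).reverse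

-- ===== PORT B =====
-- phase 1 of Source B: the outer while peels off the maximal same-parity prefix xs[i:j] and
-- continues from j; ported as structural recursion on the remaining suffix (exact).
def pvRunsB : List Int → List (List Int)
  | [] => []
  | y :: ys =>
    (y :: ys.takeWhile (fun x => PySem.Int.mod x 2 == PySem.Int.mod y 2))
      :: pvRunsB (ys.dropWhile (fun x => PySem.Int.mod x 2 == PySem.Int.mod y 2))
termination_by l => l.length
decreasing_by
  have := List.length_dropWhile_le (fun x => PySem.Int.mod x 2 == PySem.Int.mod y 2) ys
  simp only [List.length_cons]; omega

def lexicographicallyLargest_alt (a : List Int) (n : Int) : List Int :=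
  let xs := PySem.List.slice a none (some (max 0 n))   -- a[:max(0, n)]
  (pvRunsB xs).foldl (fun out r => out ++ PySem.List.sorted r (fun x => x) true) []

-- ===== PRECONDITION & SPEC =====
-- Pre_ excludes exactly the inputs where A raises IndexError (n beyond len(a)).
def Pre_lexicographicallyLargest (a : List Int) (n : Int) : Prop := n ≤ (a.length : Int)
instance (a : List Int) (n : Int) : Decidable (Pre_lexicographicallyLargest a n) := by unfold Pre_lexicographicallyLargest; infer_instance
def pvWitness_lexicographicallyLargest : List Int × Int := ([3, 1, 4, 2], 4)

def Spec_lexicographicallyLargest (a : List Int) (n : Int) (out : List Int) : Prop := out = lexicographicallyLargest_alt a n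
instance (a : List Int) (n : Int) (out : List Int) : Decidable (Spec_lexicographicallyLargest a n out) := by unfold Spec_lexicographicallyLargest; infer_instance

-- ===== CLAIM (what is proved, stated in full; the proofs are below) =====
def Claim_equal_lexicographicallyLargest : Prop := ∀ (a : List Int) (n : Int), Dom_lexicographicallyLargest a n → Pre_lexicographicallyLargest a n → Spec_lexicographicallyLargest a n (lexicographicallyLargest a n)
-- ===== LEMMAS AND PROOFS =====

-- A's finishing flush and B's sort-and-flatten of the runs (proof-side abbreviations).
def pvFinish (st : List Int × List Int) : List Int :=
  if st.2 = [] then st.1 else st.1 ++ (PySem.List.sorted st.2 (fun x => x) false).reverse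
def pvFlat (rs : List (List Int)) : List Int :=
  (rs.map (fun r => PySem.List.sorted r (fun x => x) true)).flatten

@[simp] lemma pvRunsB_nil : pvRunsB [] = [] := by rw [pvRunsB]

lemma pvRunsB_cons (y : Int) (ys : List Int) :
    pvRunsB (y :: ys)
      = (y :: ys.takeWhile (fun x => PySem.Int.mod x 2 == PySem.Int.mod y 2))
          :: pvRunsB (ys.dropWhile (fun x => PySem.Int.mod x 2 == PySem.Int.mod y 2)) := by
  rw [pvRunsB.eq_def]

-- pvRunsB_cons with the run predicate in the normal form `z % 2` that `simp` produces.
lemma pvRunsB_cons' (y : Int) (ys : List Int) :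
    pvRunsB (y :: ys)
      = (y :: ys.takeWhile (fun x => x % 2 == y % 2))
          :: pvRunsB (ys.dropWhile (fun x => x % 2 == y % 2)) := by
  rw [pvRunsB_cons]
  simp

lemma pvSortedRev (r : List Int) :
    (PySem.List.sorted r (fun x => x) false).reverse = PySem.List.sorted r (fun x => x) true := by
  apply List.Perm.eq_of_pairwise (le := fun a b : Int => b ≤ a)
  · exact fun a b _ _ h1 h2 => le_antisymm h2 h1
  · exact (List.pairwise_reverse).2 (PySem.List.sorted_pairwise r (fun x => x))
  · exact PySem.List.sorted_pairwise_rev r (fun x => x)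
  · exact (List.reverse_perm _).trans
      ((PySem.List.sorted_perm r (fun x : Int => x) false).trans
        (PySem.List.sorted_perm r (fun x : Int => x) true).symm)

lemma pvParityAdd (l x : Int) :
    PySem.Int.mod (l + x) 2 = 0 ↔ PySem.Int.mod x 2 = PySem.Int.mod l 2 := by
  rw [PySem.Int.mod_eq_emod_of_pos (by norm_num), PySem.Int.mod_eq_emod_of_pos (by norm_num),
    PySem.Int.mod_eq_emod_of_pos (by norm_num)]
  omega

lemma pvMain : ∀ (xs small b : List Int) (p : Int), small ≠ [] →
    (∀ y ∈ small, PySem.Int.mod y 2 = p) →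
    pvFinish (xs.foldl pvStepV (b, small))
      = b ++ PySem.List.sorted (small ++ xs.takeWhile (fun x => PySem.Int.mod x 2 == p)) (fun x => x) true
          ++ pvFlat (pvRunsB (xs.dropWhile (fun x => PySem.Int.mod x 2 == p))) := by
  intro xs
  induction xs with
  | nil =>
    intro small b p h hp
    simp [pvFinish, pvFlat, h, pvSortedRev]
  | cons x xs ih =>
    intro small b p h hp
    have hlast : PySem.List.pyGetD small (-1) 0 = small.getLast h :=
      PySem.List.pyGetD_neg_one small 0 h
    have hplast : PySem.Int.mod (small.getLast h) 2 = p := hp _ (List.getLast_mem h)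
    have hne : ¬((b, small).2 = ([] : List Int)) := h
    have hmodx : PySem.Int.mod x 2 = x % 2 := PySem.Int.mod_eq_emod_of_pos (by norm_num)
    by_cases hx : PySem.Int.mod x 2 = p
    · have hx' : x % 2 = p := hmodx.symm.trans hx
      have hc : PySem.Int.mod (PySem.List.pyGetD (b, small).2 (-1) 0 + x) 2 = 0 := by
        show PySem.Int.mod (PySem.List.pyGetD small (-1) 0 + x) 2 = 0
        rw [hlast, pvParityAdd, hx, hplast]
      have hstep : pvStepV (b, small) x = (b, small ++ [x]) := by
        unfold pvStepV
        rw [if_neg hne, if_pos hc]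
      have hp' : ∀ y ∈ small ++ [x], PySem.Int.mod y 2 = p := by
        intro y hy
        rcases List.mem_append.1 hy with hy | hy
        · exact hp y hy
        · simp only [List.mem_singleton] at hy
          simpa [hy] using hx
      rw [List.foldl_cons, hstep, ih (small ++ [x]) b p (by simp) hp']
      simp [hx', List.append_assoc]
    · have hx' : ¬ x % 2 = p := fun hh => hx (hmodx.trans hh)
      have hc : ¬ PySem.Int.mod (PySem.List.pyGetD (b, small).2 (-1) 0 + x) 2 = 0 := by
        show ¬ PySem.Int.mod (PySem.List.pyGetD small (-1) 0 + x) 2 = 0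
        rw [hlast, pvParityAdd, hplast]
        exact hx
      have hstep : pvStepV (b, small) x
          = (b ++ (PySem.List.sorted small (fun x => x) false).reverse, [x]) := by
        unfold pvStepV
        rw [if_neg hne, if_neg hc]
      rw [List.foldl_cons, hstep,
        ih [x] (b ++ (PySem.List.sorted small (fun x => x) false).reverse)
          (PySem.Int.mod x 2) (by simp) (by simp)]
      simp [pvFlat, pvSortedRev, pvRunsB_cons', hx', List.append_assoc]

lemma pvTop (xs : List Int) : pvFinish (xs.foldl pvStepV ([], [])) = pvFlat (pvRunsB xs) := by
  cases xs with
  | nil => simp [pvFinish, pvFlat]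
  | cons y ys =>
    have hstep : pvStepV (([] : List Int), ([] : List Int)) y = ([], [y]) := by
      unfold pvStepV
      rw [if_pos rfl]
      rfl
    rw [List.foldl_cons, hstep, pvMain ys [y] [] (PySem.Int.mod y 2) (by simp) (by simp),
      pvRunsB_cons]
    simp [pvFlat]

lemma pvFoldRange {σ : Type} (a : List Int) (f : σ → Int → σ) (init : σ) (k : Nat)
    (hk : k ≤ a.length) :
    (PySem.List.pyRange 0 (k : Int) 1).foldl (fun acc j => f acc (PySem.List.pyGetD a j 0)) init
      = (a.take k).foldl f init := by
  induction k generalizing init with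
  | zero => simp [PySem.List.pyRange_one_eq_nil]
  | succ m ih =>
    have hm : m < a.length := by omega
    have hr : PySem.List.pyRange 0 ((m + 1 : Nat) : Int) 1
        = PySem.List.pyRange 0 (m : Int) 1 ++ [(m : Int)] := by
      push_cast
      exact PySem.List.pyRange_one_succ_right (by omega)
    have hv : PySem.List.pyGetD a ((m : Nat) : Int) 0 = a[m] := by
      rw [PySem.List.pyGetD_natCast, List.getD_eq_getElem?_getD, List.getElem?_eq_getElem hm,
        Option.getD_some]
    have ht : a.take (m + 1) = a.take m ++ [a[m]] := by
      rw [List.take_add_one, List.getElem?_eq_getElem hm]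
      rfl
    rw [hr, List.foldl_append, ih init (by omega), ht, List.foldl_append,
      List.foldl_cons, List.foldl_nil, List.foldl_cons, List.foldl_nil, hv]

lemma pvFoldAppend (rs : List (List Int)) (out0 : List Int) :
    rs.foldl (fun out r => out ++ PySem.List.sorted r (fun x => x) true) out0
      = out0 ++ pvFlat rs := by
  induction rs generalizing out0 with
  | nil => simp [pvFlat]
  | cons r rs ih => simp [pvFlat, ih, List.append_assoc]

-- ===== VERDICT (by name: the statement is the Claim_ definition above) =====
theorem lexicographicallyLargest_spec : Claim_equal_lexicographicallyLargest := by
  intro a n _ hpre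
  unfold Spec_lexicographicallyLargest lexicographicallyLargest lexicographicallyLargest_alt
  have hxs : PySem.List.slice a none (some (max 0 n)) = a.take n.toNat := by
    rw [PySem.List.slice_to a (le_max_left 0 n)]
    congr 1
    omega
  rw [hxs, pvFoldAppend, List.nil_append]
  by_cases hn : 0 ≤ n
  · have hn' : PySem.List.pyRange 0 n 1 = PySem.List.pyRange 0 ((n.toNat : Nat) : Int) 1 := by
      congr 1
      omega
    rw [hn', pvFoldRange a pvStepV ([], []) n.toNat
      (by unfold Pre_lexicographicallyLargest at hpre; omega)]
    exact pvTop (a.take n.toNat)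
  · rw [PySem.List.pyRange_one_eq_nil (by omega), show n.toNat = 0 from by omega]
    simp only [List.take_zero, List.foldl_nil, pvRunsB_nil]
    simp [pvFlat]
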